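-- pv_equiv track=rewrite | github.com/jmservera/aithena | src/document-indexer/document_indexer/chunker.py | _word_based_ranges
-- ===== SOURCE A (Python) =====
-- def _word_based_ranges(n: int, chunk_size: int, overlap: int) -> list[tuple[int, int]]:
--     """Return ``(start, end)`` word-index pairs using fixed-stride splitting."""
--     ranges: list[tuple[int, int]] = []
--     stride = max(1, chunk_size - overlap)
--     start = 0
--     while start < n:
--         end = min(start + chunk_size, n)
--         ranges.append((start, end))
--         if end == n:
--             break
--         start += stride
--     return ranges
-- ===== SOURCE B (Python) =====
-- def _word_based_ranges(n: int, chunk_size: int, overlap: int) -> list[tuple[int, int]]: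
--     """Closed-form chunk count + single comprehension instead of a while/break loop."""
--     stride = max(1, chunk_size - overlap)
--     if n <= 0:
--         return []
--     i_stop = -(-n // stride)                       # ceil(n / stride)
--     i_break = max(0, -((chunk_size - n) // stride))  # ceil((n - chunk_size) / stride)
--     count = min(i_break + 1, i_stop)
--     return [(i * stride, min(i * stride + chunk_size, n)) for i in range(count)]
-- ===== Notes on version B (the rewrite author's own statement) =====
-- stated objective: alternative
-- what changed: Replaces the while/break loop (which appends chunks until one's end reaches n) with an upfront closed-form chunk count computed by ceiling division, then builds the list in one comprehension over range(count).
import Mathlib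
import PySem

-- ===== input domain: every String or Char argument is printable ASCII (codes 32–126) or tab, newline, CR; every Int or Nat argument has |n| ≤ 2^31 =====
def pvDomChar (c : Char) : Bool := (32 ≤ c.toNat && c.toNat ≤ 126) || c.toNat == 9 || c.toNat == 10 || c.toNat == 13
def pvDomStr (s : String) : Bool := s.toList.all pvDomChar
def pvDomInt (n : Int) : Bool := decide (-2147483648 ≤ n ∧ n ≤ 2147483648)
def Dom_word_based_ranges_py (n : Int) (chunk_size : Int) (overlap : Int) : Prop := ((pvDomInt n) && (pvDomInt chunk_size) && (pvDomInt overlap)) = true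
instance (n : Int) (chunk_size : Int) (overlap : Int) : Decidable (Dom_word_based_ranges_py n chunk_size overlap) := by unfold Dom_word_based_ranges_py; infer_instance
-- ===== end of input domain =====

-- B replaces the while/break loop by a closed-form chunk count plus one range comprehension (objective: alternative decomposition, same cost).
-- ===== PORT A =====
def wbrLoop (n chunk_size overlap start : Int) : List (Int × Int) :=
  if _h : start < n then
    let stride := max 1 (chunk_size - overlap)
    let e := min (start + chunk_size) n
    (start, e) :: (if e = n then [] else wbrLoop n chunk_size overlap (start + stride))
  else []
termination_by (n - start).toNat
decreasing_by
  have : (1:Int) ≤ max 1 (chunk_size - overlap) := le_max_left _ _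
  omega

-- literal transliteration of A's while loop (append+break becomes cons / stop)
def word_based_ranges_py (n : Int) (chunk_size : Int) (overlap : Int) : List (Int × Int) :=
  wbrLoop n chunk_size overlap 0


-- ===== PORT B =====
-- literal transliteration of B: closed-form count, then one comprehension over range(count)
def word_based_ranges_py_alt (n : Int) (chunk_size : Int) (overlap : Int) : List (Int × Int) :=
  let stride := max 1 (chunk_size - overlap)
  if n ≤ 0 then []
  else
    let iStop := -(PySem.Int.floordiv (-n) stride)
    let iBreak := max 0 (-(PySem.Int.floordiv (chunk_size - n) stride))
    let count := min (iBreak + 1) iStop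
    (PySem.List.pyRange 0 count 1).map (fun i => (i * stride, min (i * stride + chunk_size) n))


-- ===== PRECONDITION & SPEC =====
def Spec_word_based_ranges_py (n : Int) (chunk_size : Int) (overlap : Int) (out : List (Int × Int)) : Prop := out = word_based_ranges_py_alt n chunk_size overlap
instance (n : Int) (chunk_size : Int) (overlap : Int) (out : List (Int × Int)) : Decidable (Spec_word_based_ranges_py n chunk_size overlap out) := by unfold Spec_word_based_ranges_py; infer_instance

-- ===== CLAIM (what is proved, stated in full; the proofs are below) =====
def Claim_equal_word_based_ranges_py : Prop := ∀ (n : Int) (chunk_size : Int) (overlap : Int), Dom_word_based_ranges_py n chunk_size overlap → Spec_word_based_ranges_py n chunk_size overlap (word_based_ranges_py n chunk_size overlap)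

-- ===== LEMMAS AND PROOFS =====


-- closed-form chunk count of A's loop when started at `start` (proof-side helper)
def wbrCount (n chunk_size overlap start : Int) : Int :=
  if start < n then
    min (max 0 (-(PySem.Int.floordiv (chunk_size - (n - start)) (max 1 (chunk_size - overlap)))) + 1)
        (-(PySem.Int.floordiv (-(n - start)) (max 1 (chunk_size - overlap))))
  else 0

theorem ceil_bracket {s : Int} (hs : 0 < s) (a : Int) :
    (-(PySem.Int.floordiv (-a) s) - 1) * s < a ∧ a ≤ (-(PySem.Int.floordiv (-a) s)) * s :=
  (PySem.Int.neg_floordiv_neg_eq_iff_of_pos hs).mp rfl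

theorem ceil_shift {s : Int} (hs : 0 < s) (a : Int) :
    -(PySem.Int.floordiv (-(a - s)) s) = -(PySem.Int.floordiv (-a) s) - 1 := by
  have h := ceil_bracket hs a
  rw [PySem.Int.neg_floordiv_neg_eq_iff_of_pos hs]
  constructor <;> nlinarith [h.1, h.2]

theorem ceil_pos {s : Int} (hs : 0 < s) {a : Int} (ha : 0 < a) :
    1 ≤ -(PySem.Int.floordiv (-a) s) := by
  have h := (ceil_bracket hs a).2
  by_contra hc
  push Not at hc
  nlinarith

theorem ceil_one {s : Int} (hs : 0 < s) {a : Int} (h0 : 0 < a) (h1 : a ≤ s) :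
    -(PySem.Int.floordiv (-a) s) = 1 := by
  rw [PySem.Int.neg_floordiv_neg_eq_iff_of_pos hs]
  constructor <;> nlinarith

theorem ceil_nonpos {s : Int} (hs : 0 < s) {a : Int} (ha : a ≤ 0) :
    -(PySem.Int.floordiv (-a) s) ≤ 0 := by
  have h := (ceil_bracket hs a).1
  by_contra hc
  push Not at hc
  nlinarith

theorem wbrLoop_eq (n chunk_size overlap start : Int) :
    wbrLoop n chunk_size overlap start =
      (List.range (wbrCount n chunk_size overlap start).toNat).map
        (fun (j : Nat) => ((start + (j : Int) * max 1 (chunk_size - overlap),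
                   min (start + (j : Int) * max 1 (chunk_size - overlap) + chunk_size) n) : Int × Int)) := by
  have hs : (0:Int) < max 1 (chunk_size - overlap) := lt_of_lt_of_le one_pos (le_max_left _ _)
  rw [wbrLoop, wbrCount]
  by_cases h : start < n
  · simp only [dif_pos h, if_pos h]
    have hms : chunk_size - (n - start) = -((n - start) - chunk_size) := by ring
    by_cases hb : min (start + chunk_size) n = n
    · -- break case: this chunk reaches n
      have hcs : n ≤ start + chunk_size := by omega
      have h1 : -(PySem.Int.floordiv (chunk_size - (n - start)) (max 1 (chunk_size - overlap))) ≤ 0 := by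
        rw [hms]; exact ceil_nonpos hs (by omega)
      have h2 : 1 ≤ -(PySem.Int.floordiv (-(n - start)) (max 1 (chunk_size - overlap))) :=
        ceil_pos hs (by omega)
      have hcount : (min (max 0 (-(PySem.Int.floordiv (chunk_size - (n - start)) (max 1 (chunk_size - overlap)))) + 1)
          (-(PySem.Int.floordiv (-(n - start)) (max 1 (chunk_size - overlap))))).toNat = 1 := by omega
      rw [hcount, if_pos hb]
      simp [hb]
    · -- step case: this chunk ends before n, loop continues at start + stride
      have hlt : start + chunk_size < n := by omega
      have he : min (start + chunk_size) n = start + chunk_size := min_eq_left (by omega)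
      rw [if_neg hb]
      rw [wbrLoop_eq n chunk_size overlap (start + max 1 (chunk_size - overlap))]
      -- count bookkeeping
      have hc1 : 1 ≤ -(PySem.Int.floordiv (chunk_size - (n - start)) (max 1 (chunk_size - overlap))) := by
        rw [hms]; exact ceil_pos hs (by omega)
      have hc2 : 1 ≤ -(PySem.Int.floordiv (-(n - start)) (max 1 (chunk_size - overlap))) :=
        ceil_pos hs (by omega)
      have hkey : wbrCount n chunk_size overlap (start + max 1 (chunk_size - overlap)) =
          min (max 0 (-(PySem.Int.floordiv (chunk_size - (n - start)) (max 1 (chunk_size - overlap)))) + 1)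
              (-(PySem.Int.floordiv (-(n - start)) (max 1 (chunk_size - overlap)))) - 1 := by
        rw [wbrCount]
        by_cases hn : start + max 1 (chunk_size - overlap) < n
        · rw [if_pos hn]
          have e2 : -(n - (start + max 1 (chunk_size - overlap))) = -((n - start) - max 1 (chunk_size - overlap)) := by ring
          have e1 : chunk_size - (n - (start + max 1 (chunk_size - overlap))) =
              -(((n - start) - chunk_size) - max 1 (chunk_size - overlap)) := by ring
          rw [e1, e2, ceil_shift hs, ceil_shift hs, ← hms]
          omega
        · rw [if_neg hn]
          have hone : -(PySem.Int.floordiv (-(n - start)) (max 1 (chunk_size - overlap))) = 1 :=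
            ceil_one hs (by omega) (by omega)
          omega
      have hnn : 0 ≤ wbrCount n chunk_size overlap (start + max 1 (chunk_size - overlap)) := by
        rw [wbrCount]; split_ifs with hn
        · have e2 : -(n - (start + max 1 (chunk_size - overlap))) = -((n - start) - max 1 (chunk_size - overlap)) := by ring
          rw [e2, ceil_shift hs]; omega
        · omega
      have htn : (min (max 0 (-(PySem.Int.floordiv (chunk_size - (n - start)) (max 1 (chunk_size - overlap)))) + 1)
          (-(PySem.Int.floordiv (-(n - start)) (max 1 (chunk_size - overlap))))).toNat =
          (wbrCount n chunk_size overlap (start + max 1 (chunk_size - overlap))).toNat + 1 := by omega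
      rw [htn, List.range_succ_eq_map, List.map_cons, List.map_map]
      refine congrArg₂ _ ?_ (List.map_congr_left fun j _ => ?_)
      · simp [he]
      · have hj : start + ((j + 1 : Nat) : Int) * max 1 (chunk_size - overlap) =
            start + max 1 (chunk_size - overlap) + (j : Int) * max 1 (chunk_size - overlap) := by
          push_cast; ring
        simp only [Function.comp, Nat.succ_eq_add_one, hj]
  · simp only [dif_neg h, if_neg h]
    simp
termination_by (n - start).toNat
decreasing_by
  have : (1:Int) ≤ max 1 (chunk_size - overlap) := le_max_left _ _
  omega

-- ===== VERDICT (by name: the statement is the Claim_ definition above) =====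
theorem word_based_ranges_py_spec : Claim_equal_word_based_ranges_py := by
  unfold Claim_equal_word_based_ranges_py Spec_word_based_ranges_py
  intro n chunk_size overlap _
  rw [word_based_ranges_py, word_based_ranges_py_alt, wbrLoop_eq, wbrCount]
  by_cases h : (0:Int) < n
  · rw [if_pos h, if_neg (by omega : ¬ n ≤ 0)]
    simp only [PySem.List.pyRange_one, List.map_map, sub_zero]
    exact List.map_congr_left fun k _ => by simp
  · rw [if_neg h, if_pos (by omega : n ≤ 0)]
    simp
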